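-- pv_equiv track=rewrite | github.com/daniel-reich/ubiquitous-fiesta | Kh7Bm9X7Q4rYB8uT7_19.py | is_vowel_sandwich
-- ===== SOURCE A (Python) =====
-- def is_vowel_sandwich(s):
--   v='aeiou'
--   l=[]
--   for bxn in s:
--     l.append(bxn)
--
--   if len(l)==3:
--     if l[1].lower() in v:
--       if l[0].lower() not in v and l[2].lower() not in v:
--         return True
--   return False
-- ===== SOURCE B (Python) =====
-- def is_vowel_sandwich(s):
--     # One-pass DFA: states 0 (start), 1 (seen consonant), 2 (seen consonant,vowel),
--     # 3 (accept: consonant,vowel,consonant). Any non-matching char rejects early.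
--     state = 0
--     for c in s:
--         vowel = c.lower() in 'aeiou'
--         if state == 0 and not vowel:
--             state = 1
--         elif state == 1 and vowel:
--             state = 2
--         elif state == 2 and not vowel:
--             state = 3
--         else:
--             return False
--     return state == 3
-- ===== Notes on version B (the rewrite author's own statement) =====
-- stated objective: alternative
-- what changed: B is a single-pass finite-state automaton over the characters (states consonant/vowel/consonant-accept, rejecting early on any mismatch or extra character), replacing A's list materialisation, length check and per-index guards.
import Mathlib
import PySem

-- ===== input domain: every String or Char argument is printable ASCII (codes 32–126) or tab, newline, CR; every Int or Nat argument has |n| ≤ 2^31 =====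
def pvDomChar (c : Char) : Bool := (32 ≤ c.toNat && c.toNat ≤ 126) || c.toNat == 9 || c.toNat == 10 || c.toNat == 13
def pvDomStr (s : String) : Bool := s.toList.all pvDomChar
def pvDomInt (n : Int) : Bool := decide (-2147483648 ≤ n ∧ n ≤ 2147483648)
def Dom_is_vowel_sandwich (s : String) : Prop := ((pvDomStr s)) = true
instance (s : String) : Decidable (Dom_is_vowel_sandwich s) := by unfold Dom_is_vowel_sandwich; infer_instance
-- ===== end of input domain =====

-- B replaces A's list copy, length check and per-index guards with a one-pass
-- finite-state automaton over the characters, rejecting early (alternative; same cost).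

-- ===== PORT A =====
-- one character, lowered, tested for membership in 'aeiou' (substring test on a 1-char string = char membership)
def pvInV (c : Char) : Bool := ("aeiou".toList).contains (PySem.Chars.lowerChar c)

def is_vowel_sandwich (s : String) : Bool :=
  -- l = []; for bxn in s: l.append(bxn)
  let l : List Char := s.toList.foldl (fun acc bxn => acc ++ [bxn]) []
  if l.length == 3 then
    -- l[1], l[0], l[2] are in range under the length guard; getD is exact here
    if pvInV ((PySem.List.pyGet? l 1).getD ' ') then
      if !(pvInV ((PySem.List.pyGet? l 0).getD ' ')) && !(pvInV ((PySem.List.pyGet? l 2).getD ' ')) then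
        true
      else false
    else false
  else false

-- ===== PORT B =====
-- the DFA loop of Source B: state advances 0→1→2→3 on the consonant/vowel/consonant
-- pattern; any other character (or a character in state 3) returns False early
def altLoop (state : Nat) (l : List Char) : Bool :=
  match l with
  | [] => state == 3
  | c :: rest =>
    let vowel := pvInV c
    if state == 0 && !vowel then altLoop 1 rest
    else if state == 1 && vowel then altLoop 2 rest
    else if state == 2 && !vowel then altLoop 3 rest
    else false

def is_vowel_sandwich_alt (s : String) : Bool := altLoop 0 s.toList

-- ===== PRECONDITION & SPEC =====
def Spec_is_vowel_sandwich (s : String) (out : Bool) : Prop := out = is_vowel_sandwich_alt s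
instance (s : String) (out : Bool) : Decidable (Spec_is_vowel_sandwich s out) := by unfold Spec_is_vowel_sandwich; infer_instance

-- ===== CLAIM (what is proved, stated in full; the proofs are below) =====
def Claim_equal_is_vowel_sandwich : Prop := ∀ (s : String), Dom_is_vowel_sandwich s → Spec_is_vowel_sandwich s (is_vowel_sandwich s)

-- ===== LEMMAS AND PROOFS =====
theorem foldl_append_id (l acc : List Char) :
    l.foldl (fun a bxn => a ++ [bxn]) acc = acc ++ l := by
  induction l generalizing acc with
  | nil => simp
  | cons x xs ih => simp [List.foldl, ih]

theorem pattern_key (l : List Char) :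
    (if l.length == 3 then
      if pvInV ((PySem.List.pyGet? l 1).getD ' ') then
        if !(pvInV ((PySem.List.pyGet? l 0).getD ' ')) && !(pvInV ((PySem.List.pyGet? l 2).getD ' ')) then
          true
        else false
      else false
    else false) = altLoop 0 l := by
  match l with
  | [] => rfl
  | [a] => cases h : pvInV a <;> simp [altLoop, h]
  | [a, b] => cases ha : pvInV a <;> cases hb : pvInV b <;> simp [altLoop, ha, hb]
  | [a, b, c] =>
      simp only [List.length_cons, List.length_nil, PySem.List.pyGet?, PySem.List.pyIdx?]
      cases ha : pvInV a <;> cases hb : pvInV b <;> cases hc : pvInV c <;>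
        simp [altLoop, ha, hb, hc]
  | a :: b :: c :: d :: rest =>
      have h3 : ((a :: b :: c :: d :: rest).length == 3) = false := by
        simp [List.length]
      rw [h3, if_neg (by simp)]
      cases ha : pvInV a <;> cases hb : pvInV b <;> cases hc : pvInV c <;>
        simp [altLoop, ha, hb, hc]

theorem is_vowel_sandwich_spec : Claim_equal_is_vowel_sandwich := by
  intro s _
  unfold Spec_is_vowel_sandwich is_vowel_sandwich is_vowel_sandwich_alt
  rw [foldl_append_id, List.nil_append]
  exact pattern_key s.toList
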